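-- pv_equiv track=rewrite | github.com/Hannah-Zhang0725/pythonProject1 | mps.py | maximum_planar_subset
-- ===== SOURCE A (Python) =====
-- def print_chords(chords, dp, i, j, result):
--     k = chords[j]
--     if i < j:
--          if k != -1:
--             if (k < i or k > j):
--                 print_chords(chords, dp, i, j - 1, result)
--             elif k == i:
--                 result.append((i, j))
--                 print_chords(chords, dp, i + 1, j - 1, result)
--             else:
--                 if dp[i][j - 1] <= dp[i][k - 1] + dp[k + 1][j - 1]:
--                     result.append((k, j))
--                     print_chords(chords, dp, k + 1, j - 1, result)
--                     print_chords(chords, dp, i, k - 1, result)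
--                 else:
--                     print_chords(chords, dp, i, j - 1, result)
--          else:
--             print_chords(chords, dp, i, j - 1, result)
--
--     return result
--
-- def maximum_planar_subset(num_nodes, chords):
--     # implementation for mps task goes here
--     # Return a tuple (size_of_subset, subset_edges)
--     #initialization
--     dp = [[0] * num_nodes for _ in range(num_nodes)]
--
--     for j in range(1,num_nodes):
--         for i in range(j):
--             k = chords[j]
--             if k != -1:
--                 #case1: k is not in (i,j)
--                 if(k < i or k > j):
--                     dp[i][j] = dp[i][j - 1]
--                 #case2
--                 elif (k == i):
--                    if i == j - 1:
--                         dp[i][j] = 1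
--                    else:
--                         dp[i][j] = dp[i + 1][j - 1] + 1
--                 #case3
--                 else:
--                     if (dp[i][j - 1] <= dp[i][k - 1] + dp[k + 1][j - 1]):
--                         dp[i][j] = dp[i][k - 1] + dp[k + 1][j - 1] + 1
--                     else:
--                         dp[i][j] = dp[i][j - 1]
--             else:
--                 dp[i][j] = dp[i][j - 1]
--
--     result = print_chords(chords, dp, 0, num_nodes - 1, [])
--
--     return dp[0][num_nodes - 1], result
-- ===== SOURCE B (Python) =====
-- def maximum_planar_subset(num_nodes, chords):
--     # Same DP recurrence, but the table is filled by increasing interval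
--     # length and the edge set is rebuilt with an explicit stack instead of
--     # recursion.  Returns (size_of_subset, subset_edges).
--     n = num_nodes
--     dp = [[0] * n for _ in range(n)]
--     for length in range(1, n):
--         for i in range(n - length):
--             j = i + length
--             k = chords[j]
--             if k == -1 or k < i or k > j:
--                 dp[i][j] = dp[i][j - 1]
--             elif k == i:
--                 dp[i][j] = dp[i + 1][j - 1] + 1
--             else:
--                 best = dp[i][k - 1] + dp[k + 1][j - 1]
--                 dp[i][j] = best + 1 if dp[i][j - 1] <= best else dp[i][j - 1]
--     result = []
--     stack = [(0, n - 1)]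
--     while stack:
--         i, j = stack.pop()
--         if i >= j:
--             continue
--         k = chords[j]
--         if k == i:
--             result.append((i, j))
--             stack.append((i + 1, j - 1))
--         elif i < k <= j and dp[i][j - 1] <= dp[i][k - 1] + dp[k + 1][j - 1]:
--             result.append((k, j))
--             stack.append((i, k - 1))
--             stack.append((k + 1, j - 1))
--         else:
--             stack.append((i, j - 1))
--     return dp[0][n - 1], result
-- ===== Notes on version B (the rewrite author's own statement) =====
-- stated objective: alternative
-- what changed: The DP table is filled by increasing interval length instead of column by column, and the recursive print_chords reconstruction is replaced by an explicit stack loop that reproduces the same preorder edge list.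
import Mathlib
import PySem

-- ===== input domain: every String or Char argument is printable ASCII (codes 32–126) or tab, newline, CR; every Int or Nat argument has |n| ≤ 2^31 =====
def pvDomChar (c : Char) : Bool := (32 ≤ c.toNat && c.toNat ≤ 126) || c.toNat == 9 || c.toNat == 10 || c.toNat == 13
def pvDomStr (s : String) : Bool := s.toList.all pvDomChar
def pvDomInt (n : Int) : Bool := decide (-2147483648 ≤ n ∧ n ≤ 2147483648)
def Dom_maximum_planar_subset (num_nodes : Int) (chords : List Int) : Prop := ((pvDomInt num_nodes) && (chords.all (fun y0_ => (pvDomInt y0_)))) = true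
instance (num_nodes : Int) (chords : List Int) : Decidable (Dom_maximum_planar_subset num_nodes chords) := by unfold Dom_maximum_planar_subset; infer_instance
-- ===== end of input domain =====

-- B fills the same DP table by increasing interval length and rebuilds the edge list with an
-- explicit stack instead of recursion; equivalence of return values is proved on Pre_ (where A returns).


-- ===== PORT A =====
-- dp[i][j] read / dp[i][j] = v write; exact whenever the indices are in range, which Pre_
-- guarantees for every access either Python performs (outside Pre_ Python raises IndexError).
def dpGet (dp : List (List Int)) (i j : Int) : Int :=
  (PySem.List.pyGet? ((PySem.List.pyGet? dp i).getD []) j).getD 0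

def dpSet (dp : List (List Int)) (i j : Int) (v : Int) : List (List Int) :=
  PySem.List.pySetD dp i (PySem.List.pySetD ((PySem.List.pyGet? dp i).getD []) j v)

-- the body of A's inner loop (value stored into dp[i][j])
def fillCellA (chords : List Int) (dp : List (List Int)) (j i : Int) : Int :=
  let k := (PySem.List.pyGet? chords j).getD 0
  if k ≠ -1 then
    if k < i ∨ k > j then dpGet dp i (j - 1)
    else if k = i then
      (if i = j - 1 then 1 else dpGet dp (i + 1) (j - 1) + 1)
    else
      if dpGet dp i (j - 1) ≤ dpGet dp i (k - 1) + dpGet dp (k + 1) (j - 1) then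
        dpGet dp i (k - 1) + dpGet dp (k + 1) (j - 1) + 1
      else dpGet dp i (j - 1)
  else dpGet dp i (j - 1)

-- A's double loop: for j in range(1, num_nodes): for i in range(j): dp[i][j] = …
def buildDpA (num_nodes : Int) (chords : List Int) : List (List Int) :=
  (PySem.List.pyRange 1 num_nodes 1).foldl
    (fun dp j => (PySem.List.pyRange 0 j 1).foldl
      (fun dp i => dpSet dp i j (fillCellA chords dp j i)) dp)
    (List.replicate num_nodes.toNat (List.replicate num_nodes.toNat 0))

-- A's recursive print_chords (result passed along, .append = ++ [·]); the Nat argument is a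
-- fuel bound used only as a totality guard: every call made by the port keeps fuel > (j-i).toNat,
-- so the fuel-exhausted line is never the value returned.
def printChords (chords : List Int) (dp : List (List Int)) :
    Nat → Int → Int → List (Int × Int) → List (Int × Int)
  | 0, _, _, result => result
  | fuel + 1, i, j, result =>
    let k := (PySem.List.pyGet? chords j).getD 0
    if i < j then
      if k ≠ -1 then
        if k < i ∨ k > j then printChords chords dp fuel i (j - 1) result
        else if k = i then printChords chords dp fuel (i + 1) (j - 1) (result ++ [(i, j)])
        else
          if dpGet dp i (j - 1) ≤ dpGet dp i (k - 1) + dpGet dp (k + 1) (j - 1) then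
            printChords chords dp fuel i (k - 1)
              (printChords chords dp fuel (k + 1) (j - 1) (result ++ [(k, j)]))
          else printChords chords dp fuel i (j - 1) result
      else printChords chords dp fuel i (j - 1) result
    else result

def maximum_planar_subset (num_nodes : Int) (chords : List Int) : Int × (List (Int × Int)) :=
  let dp := buildDpA num_nodes chords
  (dpGet dp 0 (num_nodes - 1),
   printChords chords dp ((num_nodes - 1).toNat + 1) 0 (num_nodes - 1) [])

-- ===== PORT B =====
-- the body of B's inner loop (B's flattened branch chain)
def fillCellB (chords : List Int) (dp : List (List Int)) (i j : Int) : Int :=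
  let k := (PySem.List.pyGet? chords j).getD 0
  if k = -1 ∨ k < i ∨ k > j then dpGet dp i (j - 1)
  else if k = i then dpGet dp (i + 1) (j - 1) + 1
  else
    let best := dpGet dp i (k - 1) + dpGet dp (k + 1) (j - 1)
    if dpGet dp i (j - 1) ≤ best then best + 1 else dpGet dp i (j - 1)

-- B's double loop: for length in range(1, n): for i in range(n - length): j = i + length; dp[i][j] = …
def buildDpB (num_nodes : Int) (chords : List Int) : List (List Int) :=
  (PySem.List.pyRange 1 num_nodes 1).foldl
    (fun dp len => (PySem.List.pyRange 0 (num_nodes - len) 1).foldl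
      (fun dp i => dpSet dp i (i + len) (fillCellB chords dp i (i + len))) dp)
    (List.replicate num_nodes.toNat (List.replicate num_nodes.toNat 0))

-- termination measure for the stack loop
def stackWeight (s : List (Int × Int)) : Nat :=
  (s.map (fun p => (2 * (p.2 - p.1) + 3).toNat + 1)).sum

-- B's while-loop: pop (i, j) from the stack top, push children; the Nat argument is a fuel
-- bound used only as a totality guard: the port calls it with fuel > stackWeight stack and each
-- iteration strictly decreases stackWeight, so the fuel-exhausted line is never the value.
def runStack (chords : List Int) (dp : List (List Int)) :
    Nat → List (Int × Int) → List (Int × Int) → List (Int × Int)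
  | 0, _, result => result
  | fuel + 1, stack, result =>
    match stack with
    | [] => result
    | (i, j) :: rest =>
      if i < j then
        let k := (PySem.List.pyGet? chords j).getD 0
        if k = i then
          runStack chords dp fuel ((i + 1, j - 1) :: rest) (result ++ [(i, j)])
        else if i < k ∧ k ≤ j ∧
            dpGet dp i (j - 1) ≤ dpGet dp i (k - 1) + dpGet dp (k + 1) (j - 1) then
          runStack chords dp fuel ((k + 1, j - 1) :: (i, k - 1) :: rest) (result ++ [(k, j)])
        else runStack chords dp fuel ((i, j - 1) :: rest) result
      else runStack chords dp fuel rest result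

def maximum_planar_subset_alt (num_nodes : Int) (chords : List Int) : Int × (List (Int × Int)) :=
  let dp := buildDpB num_nodes chords
  (dpGet dp 0 (num_nodes - 1),
   runStack chords dp (stackWeight [(0, num_nodes - 1)] + 1) [(0, num_nodes - 1)] [])

-- ===== PRECONDITION & SPEC =====
-- Pre_ is exactly where the Python A returns: it needs num_nodes ≥ 1 (else dp[0] / chords[-…]
-- raises IndexError), chords[j] for every j < num_nodes, and when num_nodes ≥ 2 and
-- chords[num_nodes-1] = num_nodes-1 the fill reads dp[num_nodes][…] and raises IndexError.
def Pre_maximum_planar_subset (num_nodes : Int) (chords : List Int) : Prop :=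
  1 ≤ num_nodes ∧ num_nodes ≤ (chords.length : Int) ∧
    (num_nodes = 1 ∨ (PySem.List.pyGet? chords (num_nodes - 1)).getD 0 ≠ num_nodes - 1)
instance (num_nodes : Int) (chords : List Int) : Decidable (Pre_maximum_planar_subset num_nodes chords) := by
  unfold Pre_maximum_planar_subset; infer_instance

def pvWitness_maximum_planar_subset : Int × List Int := (4, [-1, -1, 1, 2])

def Spec_maximum_planar_subset (num_nodes : Int) (chords : List Int) (out : Int × (List (Int × Int))) : Prop := out = maximum_planar_subset_alt num_nodes chords
instance (num_nodes : Int) (chords : List Int) (out : Int × (List (Int × Int))) : Decidable (Spec_maximum_planar_subset num_nodes chords out) := by unfold Spec_maximum_planar_subset; infer_instance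

-- ===== CLAIM (what is proved, stated in full; the proofs are below) =====
def Claim_equal_maximum_planar_subset : Prop := ∀ (num_nodes : Int) (chords : List Int), Dom_maximum_planar_subset num_nodes chords → Pre_maximum_planar_subset num_nodes chords → Spec_maximum_planar_subset num_nodes chords (maximum_planar_subset num_nodes chords)

-- ===== LEMMAS AND PROOFS =====

-- termination facts for dpF (cited by name in decreasing_by)
theorem pvTermF1 (n i j : Int) (h : 0 ≤ i ∧ i < j ∧ j < n) : (j - 1).toNat < j.toNat := by omega
theorem pvTermF2 (n i j k : Int) (h : 0 ≤ i ∧ i < j ∧ j < n)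
    (hor : ¬ (k = -1 ∨ k < i ∨ k > j)) : (k - 1).toNat < j.toNat := by omega

-- the common recurrence both tables satisfy, as a standalone recursion
def dpF (n : Int) (chords : List Int) (i j : Int) : Int :=
  if h : 0 ≤ i ∧ i < j ∧ j < n then
    let k := (PySem.List.pyGet? chords j).getD 0
    if k = -1 ∨ k < i ∨ k > j then dpF n chords i (j - 1)
    else if k = i then dpF n chords (i + 1) (j - 1) + 1
    else
      let best := dpF n chords i (k - 1) + dpF n chords (k + 1) (j - 1)
      if dpF n chords i (j - 1) ≤ best then best + 1 else dpF n chords i (j - 1)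
  else 0
termination_by j.toNat
decreasing_by
  all_goals try exact pvTermF1 n i j h
  all_goals (rename_i hor hki; exact pvTermF2 n i j _ h hor)

-- shape of the table: n rows of length n
def Shape (n : Int) (dp : List (List Int)) : Prop :=
  dp.length = n.toNat ∧ ∀ row ∈ dp, row.length = n.toNat

theorem shape_replicate (n : Int) :
    Shape n (List.replicate n.toNat (List.replicate n.toNat 0)) := by
  constructor
  · simp
  · intro row hrow
    simp_all [List.eq_of_mem_replicate hrow]

theorem dpGet_replicate (n : Int) (a b : Int) (ha : 0 ≤ a) (hb : 0 ≤ b) :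
    dpGet (List.replicate n.toNat (List.replicate n.toNat 0)) a b = 0 := by
  unfold dpGet
  rw [PySem.List.pyGet?_of_nonneg _ ha, PySem.List.pyGet?_of_nonneg _ hb]
  rcases Nat.lt_or_ge a.toNat n.toNat with h | h
  · rw [List.getElem?_replicate]
    simp only [h, if_pos, Option.getD_some]
    rcases Nat.lt_or_ge b.toNat n.toNat with h2 | h2 <;>
      simp [List.getElem?_replicate, h2, Nat.not_lt.mpr]
  · rw [List.getElem?_replicate]
    simp [Nat.not_lt.mpr h]

theorem shape_dpSet (n : Int) (dp : List (List Int)) (i j v : Int) (hi : 0 ≤ i) (h : Shape n dp) :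
    Shape n (dpSet dp i j v) := by
  obtain ⟨h1, h2⟩ := h
  unfold dpSet
  rw [PySem.List.pySetD_of_nonneg _ _ hi]
  rcases Nat.lt_or_ge i.toNat dp.length with hlt | hge
  · refine ⟨by simp [h1], ?_⟩
    intro row hrow
    rcases List.mem_or_eq_of_mem_set hrow with hm | he
    · exact h2 row hm
    · rw [he, PySem.List.length_pySetD]
      rw [PySem.List.pyGet?_of_nonneg _ hi, List.getElem?_eq_getElem hlt]
      exact h2 _ (List.getElem_mem hlt)
  · rw [List.set_eq_of_length_le hge]
    exact ⟨h1, h2⟩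

theorem dpGet_dpSet (n : Int) (dp : List (List Int)) (i j v : Int) (h : Shape n dp)
    (hi0 : 0 ≤ i) (hin : i < n) (hj0 : 0 ≤ j) (hjn : j < n) (a b : Int)
    (ha : 0 ≤ a) (hb : 0 ≤ b) :
    dpGet (dpSet dp i j v) a b = if a = i ∧ b = j then v else dpGet dp a b := by
  obtain ⟨h1, h2⟩ := h
  have hilen : i.toNat < dp.length := by omega
  have hrow : PySem.List.pyGet? dp i = some dp[i.toNat] := by
    rw [PySem.List.pyGet?_of_nonneg _ hi0, List.getElem?_eq_getElem hilen]
  have hrlen : dp[i.toNat].length = n.toNat := h2 _ (List.getElem_mem hilen)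
  unfold dpSet dpGet
  rw [PySem.List.pySetD_of_nonneg _ _ hi0, hrow]
  simp only [Option.getD_some]
  rw [PySem.List.pySetD_of_nonneg _ _ hj0]
  rw [PySem.List.pyGet?_of_nonneg _ ha, List.getElem?_set]
  by_cases hai : a = i
  · subst hai
    simp only [if_pos rfl, hilen, if_pos, Option.getD_some]
    rw [PySem.List.pyGet?_of_nonneg _ hb, List.getElem?_set]
    by_cases hbj : b = j
    · subst hbj
      have hblen : b.toNat < dp[a.toNat].length := by omega
      simp [hblen]
    · have hnj : ¬ (j.toNat = b.toNat) := by omega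
      simp only [hnj, if_false, hbj, and_false, if_false]
      rw [hrow]
      simp only [Option.getD_some]
      rw [PySem.List.pyGet?_of_nonneg _ hb]
  · have hna : ¬ (i.toNat = a.toNat) := by omega
    simp only [hna, if_false, hai, false_and, if_false]
    rw [PySem.List.pyGet?_of_nonneg _ ha]

-- the cell values both fills write equal dpF, given the already-filled reads
theorem fillCellA_eq (n : Int) (chords : List Int) (dp : List (List Int)) (i j : Int)
    (hij : 0 ≤ i ∧ i < j ∧ j < n)
    (hread : ∀ a b : Int, 0 ≤ a → 0 ≤ b → b < j → dpGet dp a b = dpF n chords a b) :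
    fillCellA chords dp j i = dpF n chords i j := by
  obtain ⟨hi0, hij', hjn⟩ := hij
  unfold fillCellA
  rw [dpF, dif_pos (⟨hi0, hij', hjn⟩ : 0 ≤ i ∧ i < j ∧ j < n)]
  dsimp only
  set k := (PySem.List.pyGet? chords j).getD 0 with hk
  by_cases hm1 : k = -1
  · rw [if_neg (by simp [hm1]), if_pos (Or.inl hm1)]
    exact hread i (j - 1) hi0 (by omega) (by omega)
  · rw [if_pos hm1]
    by_cases h1 : k < i ∨ k > j
    · rw [if_pos h1, if_pos (by tauto)]
      exact hread i (j - 1) hi0 (by omega) (by omega)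
    · rw [if_neg h1, if_neg (show ¬(k = -1 ∨ k < i ∨ k > j) by tauto)]
      by_cases h2 : k = i
      · rw [if_pos h2, if_pos h2]
        by_cases h3 : i = j - 1
        · rw [if_pos h3, dpF, dif_neg (by omega)]
          norm_num
        · rw [if_neg h3, hread (i + 1) (j - 1) (by omega) (by omega) (by omega)]
      · rw [if_neg h2, if_neg h2]
        have hkb : i < k ∧ k ≤ j := by omega
        rw [hread i (k - 1) hi0 (by omega) (by omega),
            hread (k + 1) (j - 1) (by omega) (by omega) (by omega),
            hread i (j - 1) hi0 (by omega) (by omega)]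

theorem fillCellB_eq (n : Int) (chords : List Int) (dp : List (List Int)) (i j : Int)
    (hij : 0 ≤ i ∧ i < j ∧ j < n)
    (hread : ∀ a b : Int, 0 ≤ a → 0 ≤ b → b - a < j - i → dpGet dp a b = dpF n chords a b) :
    fillCellB chords dp i j = dpF n chords i j := by
  obtain ⟨hi0, hij', hjn⟩ := hij
  unfold fillCellB
  rw [dpF, dif_pos (⟨hi0, hij', hjn⟩ : 0 ≤ i ∧ i < j ∧ j < n)]
  dsimp only
  set k := (PySem.List.pyGet? chords j).getD 0 with hk
  by_cases h1 : k = -1 ∨ k < i ∨ k > j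
  · rw [if_pos h1, if_pos h1]
    exact hread i (j - 1) hi0 (by omega) (by omega)
  · rw [if_neg h1, if_neg h1]
    by_cases h2 : k = i
    · rw [if_pos h2, if_pos h2, hread (i + 1) (j - 1) (by omega) (by omega) (by omega)]
    · rw [if_neg h2, if_neg h2]
      have hkb : i < k ∧ k ≤ j := by omega
      rw [hread i (k - 1) hi0 (by omega) (by omega),
          hread (k + 1) (j - 1) (by omega) (by omega) (by omega),
          hread i (j - 1) hi0 (by omega) (by omega)]

-- A's inner loop: after writing dp[0][j] … dp[t-1][j] on top of fully filled columns < j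
theorem innerA_spec (n : Int) (chords : List Int) (j : Int) (hj0 : 0 < j) (hjn : j < n) :
    ∀ (t : Nat) (dp : List (List Int)), (t : Int) ≤ j → Shape n dp →
      (∀ a b : Int, 0 ≤ a → 0 ≤ b → dpGet dp a b = if b < j then dpF n chords a b else 0) →
      Shape n ((PySem.List.pyRange 0 (t : Int)).foldl
          (fun dp i => dpSet dp i j (fillCellA chords dp j i)) dp) ∧
      (∀ a b : Int, 0 ≤ a → 0 ≤ b →
        dpGet ((PySem.List.pyRange 0 (t : Int)).foldl
            (fun dp i => dpSet dp i j (fillCellA chords dp j i)) dp) a b =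
          if b < j then dpF n chords a b
          else if b = j ∧ a < (t : Int) then dpF n chords a b else 0) := by
  intro t
  induction t with
  | zero =>
    intro dp ht hsh hprev
    rw [show ((0 : Nat) : Int) = 0 by rfl, PySem.List.pyRange_one_eq_nil (by omega)]
    refine ⟨hsh, ?_⟩
    intro a b ha hb
    rw [List.foldl_nil, hprev a b ha hb]
    split_ifs <;> first | rfl | omega
  | succ t ih =>
    intro dp ht hsh hprev
    rw [show ((t + 1 : Nat) : Int) = (t : Int) + 1 by push_cast; ring,
        PySem.List.pyRange_one_succ_right (by omega), List.foldl_append,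
        List.foldl_cons, List.foldl_nil]
    obtain ⟨hsh', hinv⟩ := ih dp (by omega) hsh hprev
    have hfill : fillCellA chords ((PySem.List.pyRange 0 (t : Int)).foldl
        (fun dp i => dpSet dp i j (fillCellA chords dp j i)) dp) j (t : Int) =
        dpF n chords (t : Int) j :=
      fillCellA_eq n chords _ (t : Int) j ⟨by omega, by omega, hjn⟩
        (fun a b ha hb hbj => by rw [hinv a b ha hb, if_pos hbj])
    constructor
    · exact shape_dpSet n _ _ _ _ (by omega) hsh'
    · intro a b ha hb
      rw [dpGet_dpSet n _ (t : Int) j _ hsh' (by omega) (by omega) (by omega) hjn a b ha hb,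
          hfill]
      by_cases hab : a = (t : Int) ∧ b = j
      · rw [if_pos hab, if_neg (by omega), if_pos (by omega), hab.1, hab.2]
      · rw [if_neg hab, hinv a b ha hb]
        split_ifs <;> first | rfl | omega

-- A's outer loop: after the first t columns
theorem buildDpA_inv (n : Int) (chords : List Int) :
    ∀ (t : Nat), 1 + (t : Int) ≤ n →
      Shape n ((PySem.List.pyRange 1 (1 + (t : Int))).foldl
        (fun dp j => (PySem.List.pyRange 0 j).foldl
          (fun dp i => dpSet dp i j (fillCellA chords dp j i)) dp)
        (List.replicate n.toNat (List.replicate n.toNat 0))) ∧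
      (∀ a b : Int, 0 ≤ a → 0 ≤ b →
        dpGet ((PySem.List.pyRange 1 (1 + (t : Int))).foldl
          (fun dp j => (PySem.List.pyRange 0 j).foldl
            (fun dp i => dpSet dp i j (fillCellA chords dp j i)) dp)
          (List.replicate n.toNat (List.replicate n.toNat 0))) a b =
          if b ≤ (t : Int) then dpF n chords a b else 0) := by
  intro t
  induction t with
  | zero =>
    rw [show (1 : Int) + ((0 : Nat) : Int) = 1 by rfl, PySem.List.pyRange_one_eq_nil (by omega)]
    intro _
    refine ⟨shape_replicate n, ?_⟩
    intro a b ha hb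
    rw [List.foldl_nil, dpGet_replicate n a b ha hb]
    split_ifs with h1
    · rw [dpF, dif_neg (by omega)]
    · rfl
  | succ t ih =>
    intro ht
    rw [show (1 : Int) + ((t + 1 : Nat) : Int) = (1 + (t : Int)) + 1 by push_cast; ring,
        PySem.List.pyRange_one_succ_right (by omega), List.foldl_append,
        List.foldl_cons, List.foldl_nil]
    obtain ⟨hsh, hinv⟩ := ih (by omega)
    have hprev : ∀ a b : Int, 0 ≤ a → 0 ≤ b →
        dpGet ((PySem.List.pyRange 1 (1 + (t : Int))).foldl
          (fun dp j => (PySem.List.pyRange 0 j).foldl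
            (fun dp i => dpSet dp i j (fillCellA chords dp j i)) dp)
          (List.replicate n.toNat (List.replicate n.toNat 0))) a b =
          if b < 1 + (t : Int) then dpF n chords a b else 0 := by
      intro a b ha hb
      rw [hinv a b ha hb]
      split_ifs <;> first | rfl | omega
    have hspec := innerA_spec n chords (1 + (t : Int)) (by omega) (by omega)
      (1 + t) _ (by push_cast; omega) hsh hprev
    rw [show (((1 + t : Nat)) : Int) = 1 + (t : Int) by push_cast; ring] at hspec
    obtain ⟨hsh', hinv'⟩ := hspec
    refine ⟨hsh', ?_⟩
    intro a b ha hb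
    rw [hinv' a b ha hb]
    split_ifs <;> first | rfl | omega | (rw [dpF, dif_neg (by omega)])

theorem buildDpA_eq (n : Int) (chords : List Int) (a b : Int) (ha : 0 ≤ a) (hb : 0 ≤ b) :
    dpGet (buildDpA n chords) a b = dpF n chords a b := by
  unfold buildDpA
  by_cases hn : n ≤ 1
  · rw [PySem.List.pyRange_one_eq_nil hn, List.foldl_nil,
        dpGet_replicate n a b ha hb, dpF, dif_neg (by omega)]
  · have h1 : (1 : Int) + (((n - 1).toNat : Nat) : Int) = n := by omega
    have hspec := buildDpA_inv n chords (n - 1).toNat (by omega)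
    rw [h1] at hspec
    obtain ⟨_, hinv⟩ := hspec
    rw [hinv a b ha hb]
    split_ifs with h2
    · rfl
    · rw [dpF, dif_neg (by omega)]

-- B's inner loop: after writing the first t cells of the diagonal of length l,
-- on top of all diagonals of length < l
theorem innerB_spec (n : Int) (chords : List Int) (l : Int) (hl0 : 0 < l) (hln : l < n) :
    ∀ (t : Nat) (dp : List (List Int)), (t : Int) ≤ n - l → Shape n dp →
      (∀ a b : Int, 0 ≤ a → 0 ≤ b → dpGet dp a b = if b - a < l then dpF n chords a b else 0) →
      Shape n ((PySem.List.pyRange 0 (t : Int)).foldl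
          (fun dp i => dpSet dp i (i + l) (fillCellB chords dp i (i + l))) dp) ∧
      (∀ a b : Int, 0 ≤ a → 0 ≤ b →
        dpGet ((PySem.List.pyRange 0 (t : Int)).foldl
            (fun dp i => dpSet dp i (i + l) (fillCellB chords dp i (i + l))) dp) a b =
          if b - a < l then dpF n chords a b
          else if b - a = l ∧ a < (t : Int) then dpF n chords a b else 0) := by
  intro t
  induction t with
  | zero =>
    intro dp ht hsh hprev
    rw [show ((0 : Nat) : Int) = 0 by rfl, PySem.List.pyRange_one_eq_nil (by omega)]
    refine ⟨hsh, ?_⟩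
    intro a b ha hb
    rw [List.foldl_nil, hprev a b ha hb]
    split_ifs <;> first | rfl | omega
  | succ t ih =>
    intro dp ht hsh hprev
    rw [show ((t + 1 : Nat) : Int) = (t : Int) + 1 by push_cast; ring,
        PySem.List.pyRange_one_succ_right (by omega), List.foldl_append,
        List.foldl_cons, List.foldl_nil]
    obtain ⟨hsh', hinv⟩ := ih dp (by omega) hsh hprev
    have hfill : fillCellB chords ((PySem.List.pyRange 0 (t : Int)).foldl
        (fun dp i => dpSet dp i (i + l) (fillCellB chords dp i (i + l))) dp) (t : Int)
        ((t : Int) + l) = dpF n chords (t : Int) ((t : Int) + l) :=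
      fillCellB_eq n chords _ (t : Int) ((t : Int) + l) ⟨by omega, by omega, by omega⟩
        (fun a b ha hb hbj => by rw [hinv a b ha hb, if_pos (by omega)])
    constructor
    · exact shape_dpSet n _ _ _ _ (by omega) hsh'
    · intro a b ha hb
      rw [dpGet_dpSet n _ (t : Int) ((t : Int) + l) _ hsh' (by omega) (by omega) (by omega)
            (by omega) a b ha hb, hfill]
      by_cases hab : a = (t : Int) ∧ b = (t : Int) + l
      · rw [if_pos hab, if_neg (by omega), if_pos (by omega), hab.1, hab.2]
      · rw [if_neg hab, hinv a b ha hb]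
        split_ifs <;> first | rfl | omega

-- B's outer loop: after the first t diagonals
theorem buildDpB_inv (n : Int) (chords : List Int) :
    ∀ (t : Nat), 1 + (t : Int) ≤ n →
      Shape n ((PySem.List.pyRange 1 (1 + (t : Int))).foldl
        (fun dp len => (PySem.List.pyRange 0 (n - len)).foldl
          (fun dp i => dpSet dp i (i + len) (fillCellB chords dp i (i + len))) dp)
        (List.replicate n.toNat (List.replicate n.toNat 0))) ∧
      (∀ a b : Int, 0 ≤ a → 0 ≤ b →
        dpGet ((PySem.List.pyRange 1 (1 + (t : Int))).foldl
          (fun dp len => (PySem.List.pyRange 0 (n - len)).foldl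
            (fun dp i => dpSet dp i (i + len) (fillCellB chords dp i (i + len))) dp)
          (List.replicate n.toNat (List.replicate n.toNat 0))) a b =
          if b - a ≤ (t : Int) then dpF n chords a b else 0) := by
  intro t
  induction t with
  | zero =>
    rw [show (1 : Int) + ((0 : Nat) : Int) = 1 by rfl, PySem.List.pyRange_one_eq_nil (by omega)]
    intro _
    refine ⟨shape_replicate n, ?_⟩
    intro a b ha hb
    rw [List.foldl_nil, dpGet_replicate n a b ha hb]
    split_ifs with h1
    · rw [dpF, dif_neg (by omega)]
    · rfl
  | succ t ih =>
    intro ht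
    rw [show (1 : Int) + ((t + 1 : Nat) : Int) = (1 + (t : Int)) + 1 by push_cast; ring,
        PySem.List.pyRange_one_succ_right (by omega), List.foldl_append,
        List.foldl_cons, List.foldl_nil]
    obtain ⟨hsh, hinv⟩ := ih (by omega)
    have hprev : ∀ a b : Int, 0 ≤ a → 0 ≤ b →
        dpGet ((PySem.List.pyRange 1 (1 + (t : Int))).foldl
          (fun dp len => (PySem.List.pyRange 0 (n - len)).foldl
            (fun dp i => dpSet dp i (i + len) (fillCellB chords dp i (i + len))) dp)
          (List.replicate n.toNat (List.replicate n.toNat 0))) a b =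
          if b - a < 1 + (t : Int) then dpF n chords a b else 0 := by
      intro a b ha hb
      rw [hinv a b ha hb]
      split_ifs <;> first | rfl | omega
    have hspec := innerB_spec n chords (1 + (t : Int)) (by omega) (by omega)
      (n - (1 + t)).toNat _ (by omega) hsh hprev
    rw [show (((n - (1 + t)).toNat : Nat) : Int) = n - (1 + (t : Int)) by omega] at hspec
    obtain ⟨hsh', hinv'⟩ := hspec
    refine ⟨hsh', ?_⟩
    intro a b ha hb
    rw [hinv' a b ha hb]
    split_ifs <;> first | rfl | omega | (rw [dpF, dif_neg (by omega)])

theorem buildDpB_eq (n : Int) (chords : List Int) (a b : Int) (ha : 0 ≤ a) (hb : 0 ≤ b) :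
    dpGet (buildDpB n chords) a b = dpF n chords a b := by
  unfold buildDpB
  by_cases hn : n ≤ 1
  · rw [PySem.List.pyRange_one_eq_nil hn, List.foldl_nil,
        dpGet_replicate n a b ha hb, dpF, dif_neg (by omega)]
  · have h1 : (1 : Int) + (((n - 1).toNat : Nat) : Int) = n := by omega
    have hspec := buildDpB_inv n chords (n - 1).toNat (by omega)
    rw [h1] at hspec
    obtain ⟨_, hinv⟩ := hspec
    rw [hinv a b ha hb]
    split_ifs with h2
    · rfl
    · rw [dpF, dif_neg (by omega)]

-- print_chords only looks at dp through dpGet at nonnegative indices, and any two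
-- sufficient fuels give the same value (one lemma covers congruence and fuel-irrelevance)
theorem printChords_congr (chords : List Int) (dp dp' : List (List Int))
    (hdp : ∀ a b : Int, 0 ≤ a → 0 ≤ b → dpGet dp a b = dpGet dp' a b) :
    ∀ (f1 f2 : Nat) (i j : Int) (r : List (Int × Int)),
      (j - i).toNat < f1 → (j - i).toNat < f2 → 0 ≤ i →
      printChords chords dp f1 i j r = printChords chords dp' f2 i j r := by
  intro f1
  induction f1 with
  | zero => intro f2 i j r h1 _ _; exact absurd h1 (by omega)
  | succ f1 ih =>
    intro f2 i j r h1 h2 hi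
    cases f2 with
    | zero => exact absurd h2 (by omega)
    | succ f2 =>
      rw [printChords]
      conv_rhs => rw [printChords]
      set k := (PySem.List.pyGet? chords j).getD 0 with hkdef
      by_cases hij : i < j
      · simp only [if_pos hij]
        by_cases h0 : k ≠ -1
        · simp only [if_pos h0]
          by_cases hor : k < i ∨ k > j
          · simp only [if_pos hor]
            exact ih f2 i (j - 1) r (by omega) (by omega) hi
          · simp only [if_neg hor]
            by_cases hki : k = i
            · simp only [if_pos hki]
              exact ih f2 (i + 1) (j - 1) _ (by omega) (by omega) (by omega)
            · simp only [if_neg hki]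
              have hik : i < k ∧ k ≤ j := by omega
              rw [hdp i (j - 1) hi (by omega), hdp i (k - 1) hi (by omega),
                  hdp (k + 1) (j - 1) (by omega) (by omega)]
              by_cases h3 : dpGet dp' i (j - 1) ≤ dpGet dp' i (k - 1) + dpGet dp' (k + 1) (j - 1)
              · simp only [if_pos h3]
                rw [ih f2 (k + 1) (j - 1) _ (by omega) (by omega) (by omega)]
                exact ih f2 i (k - 1) _ (by omega) (by omega) hi
              · simp only [if_neg h3]
                exact ih f2 i (j - 1) r (by omega) (by omega) hi
        · simp only [if_neg h0]
          exact ih f2 i (j - 1) r (by omega) (by omega) hi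
      · simp only [if_neg hij]

theorem stackWeight_cons (i j : Int) (s : List (Int × Int)) :
    stackWeight ((i, j) :: s) = ((2 * (j - i) + 3).toNat + 1) + stackWeight s := by
  simp [stackWeight]

-- running print_chords on each stack entry in order (with its canonical fuel)
def pcList (chords : List Int) (dp : List (List Int)) :
    List (Int × Int) → List (Int × Int) → List (Int × Int)
  | [], r => r
  | (i, j) :: s, r =>
    pcList chords dp s (printChords chords dp ((j - i).toNat + 1) i j r)

-- fuel-irrelevance specialised from printChords_congr (same table)
theorem printChords_fuel (chords : List Int) (dp : List (List Int)) (f1 f2 : Nat)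
    (i j : Int) (r : List (Int × Int)) (h1 : (j - i).toNat < f1) (h2 : (j - i).toNat < f2)
    (hi : 0 ≤ i) : printChords chords dp f1 i j r = printChords chords dp f2 i j r :=
  printChords_congr chords dp dp (fun _ _ _ _ => rfl) f1 f2 i j r h1 h2 hi

-- the stack loop computes the recursion (popping entries = running print_chords on them)
theorem runStack_eq_pcList (chords : List Int) (dp : List (List Int)) :
    ∀ (fuel : Nat) (stack : List (Int × Int)) (r : List (Int × Int)),
      stackWeight stack ≤ fuel → (∀ p ∈ stack, 0 ≤ p.1) →
      runStack chords dp fuel stack r = pcList chords dp stack r := by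
  intro fuel
  induction fuel with
  | zero =>
    intro stack r hm _
    match stack with
    | [] => rfl
    | (i, j) :: s => rw [stackWeight_cons] at hm; omega
  | succ fuel ih =>
    intro stack r hm hs
    match stack with
    | [] => rfl
    | (i, j) :: s =>
      rw [stackWeight_cons] at hm
      have hi : 0 ≤ i := hs (i, j) List.mem_cons_self
      have hs' : ∀ p ∈ s, 0 ≤ p.1 := fun p hp => hs p (List.mem_cons_of_mem _ hp)
      rw [runStack, pcList]
      by_cases hij : i < j
      · simp only [if_pos hij]
        set k := (PySem.List.pyGet? chords j).getD 0 with hkdef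
        by_cases h1 : k = i
        · simp only [if_pos h1]
          rw [ih ((i + 1, j - 1) :: s) (r ++ [(i, j)]) (by rw [stackWeight_cons]; omega)
                (by intro p hp; rcases List.mem_cons.mp hp with h | h
                    · rw [h]; dsimp only; omega
                    · exact hs' p h),
              pcList]
          congr 1
          conv_rhs => rw [printChords]
          simp only [if_pos hij]
          rw [← hkdef, if_pos (show ¬ k = -1 by omega),
              if_neg (show ¬ (k < i ∨ k > j) by omega), if_pos h1]
          exact printChords_fuel chords dp _ _ _ _ _ (by omega) (by omega) (by omega)
        · simp only [if_neg h1]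
          by_cases h2 : i < k ∧ k ≤ j ∧
              dpGet dp i (j - 1) ≤ dpGet dp i (k - 1) + dpGet dp (k + 1) (j - 1)
          · simp only [if_pos h2]
            rw [ih ((k + 1, j - 1) :: (i, k - 1) :: s) (r ++ [(k, j)])
                  (by rw [stackWeight_cons, stackWeight_cons]; omega)
                  (by intro p hp; rcases List.mem_cons.mp hp with h | h
                      · rw [h]; dsimp only; omega
                      · rcases List.mem_cons.mp h with h' | h'
                        · rw [h']; dsimp only; omega
                        · exact hs' p h'),
                pcList, pcList]
            congr 1
            conv_rhs => rw [printChords]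
            simp only [if_pos hij]
            rw [← hkdef, if_pos (show ¬ k = -1 by omega),
                if_neg (show ¬ (k < i ∨ k > j) by omega), if_neg h1, if_pos h2.2.2]
            rw [printChords_fuel chords dp ((j - i).toNat) ((j - 1 - (k + 1)).toNat + 1)
                  (k + 1) (j - 1) (r ++ [(k, j)]) (by omega) (by omega) (by omega)]
            exact printChords_fuel chords dp _ _ _ _ _ (by omega) (by omega) hi
          · simp only [if_neg h2]
            rw [ih ((i, j - 1) :: s) r (by rw [stackWeight_cons]; omega)
                  (by intro p hp; rcases List.mem_cons.mp hp with h | h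
                      · rw [h]; dsimp only; omega
                      · exact hs' p h),
                pcList]
            congr 1
            conv_rhs => rw [printChords]
            simp only [if_pos hij]
            rw [← hkdef]
            by_cases h0 : k = -1
            · rw [if_neg (show ¬ ¬ k = -1 by simp [h0])]
              exact printChords_fuel chords dp _ _ _ _ _ (by omega) (by omega) hi
            · rw [if_pos h0]
              by_cases hor : k < i ∨ k > j
              · rw [if_pos hor]
                exact printChords_fuel chords dp _ _ _ _ _ (by omega) (by omega) hi
              · have hcond : ¬ (dpGet dp i (j - 1) ≤ dpGet dp i (k - 1) + dpGet dp (k + 1) (j - 1)) :=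
                  fun hc => h2 ⟨by omega, by omega, hc⟩
                rw [if_neg hor, if_neg h1, if_neg hcond]
                exact printChords_fuel chords dp _ _ _ _ _ (by omega) (by omega) hi
      · simp only [if_neg hij]
        rw [ih s r (by omega) hs']
        congr 1
        rw [printChords]
        simp only [if_neg hij]

-- ===== VERDICT (by name: the statement is the Claim_ definition above) =====
theorem maximum_planar_subset_spec : Claim_equal_maximum_planar_subset := by
  intro n chords _hdom hpre
  obtain ⟨hn, _, _⟩ := hpre
  unfold Spec_maximum_planar_subset
  unfold maximum_planar_subset maximum_planar_subset_alt
  have hdp : ∀ a b : Int, 0 ≤ a → 0 ≤ b →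
      dpGet (buildDpA n chords) a b = dpGet (buildDpB n chords) a b := by
    intro a b ha hb
    rw [buildDpA_eq n chords a b ha hb, buildDpB_eq n chords a b ha hb]
  have h1 : dpGet (buildDpA n chords) 0 (n - 1) = dpGet (buildDpB n chords) 0 (n - 1) :=
    hdp 0 (n - 1) le_rfl (by omega)
  have h2 : runStack chords (buildDpB n chords) (stackWeight [(0, n - 1)] + 1) [(0, n - 1)] [] =
      printChords chords (buildDpB n chords) ((n - 1 - 0).toNat + 1) 0 (n - 1) [] := by
    rw [runStack_eq_pcList chords (buildDpB n chords) (stackWeight [(0, n - 1)] + 1)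
          [(0, n - 1)] [] (Nat.le_succ _)
          (by intro p hp; rcases List.mem_singleton.mp hp with rfl; exact le_refl 0),
        pcList, pcList]
  have h3 : printChords chords (buildDpA n chords) ((n - 1).toNat + 1) 0 (n - 1) [] =
      printChords chords (buildDpB n chords) ((n - 1 - 0).toNat + 1) 0 (n - 1) [] :=
    printChords_congr chords _ _ hdp ((n - 1).toNat + 1) ((n - 1 - 0).toNat + 1)
      0 (n - 1) [] (by omega) (by omega) le_rfl
  simp only [h1, h2, h3]
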